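-- pv_equiv track=rewrite | github.com/arijitchowdhury80/partnerforge | backend/app/modules/m12_case_study.py | _use_cases_related
-- ===== SOURCE A (Python) =====
-- def _use_cases_related(u1: str, u2: str) -> bool:
--     """Check if two use cases are related."""
--     related_groups = [
--         {"site search", "product search", "search", "ecommerce search"},
--         {"recommendations", "personalization", "product recommendations"},
--         {"content discovery", "content search", "media search"},
--         {"support", "help desk", "knowledge base", "documentation"},
--     ]
--     for group in related_groups:
--         if any(term in u1 for term in group) and any(term in u2 for term in group):
--             return True
--     return False
-- ===== SOURCE B (Python) =====
-- _TERM_BITS = [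
--     ("site search", 1), ("product search", 1), ("search", 1), ("ecommerce search", 1),
--     ("recommendations", 2), ("personalization", 2), ("product recommendations", 2),
--     ("content discovery", 4), ("content search", 4), ("media search", 4),
--     ("support", 8), ("help desk", 8), ("knowledge base", 8), ("documentation", 8),
-- ]
--
-- def _match_mask(u: str) -> int:
--     m = 0
--     for term, bit in _TERM_BITS:
--         if term in u:
--             m |= bit
--     return m
--
-- def _use_cases_related(u1: str, u2: str) -> bool:
--     """Check if two use cases are related."""
--     return (_match_mask(u1) & _match_mask(u2)) != 0
-- ===== Notes on version B (the rewrite author's own statement) =====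
-- stated objective: alternative
-- what changed: Replaces the nested per-group/per-string short-circuiting loop with a flat term-to-bit table: one pass per string OR-accumulates a 4-bit group bitmask, and relatedness is a single bitwise AND test of the two masks.
import Mathlib
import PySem

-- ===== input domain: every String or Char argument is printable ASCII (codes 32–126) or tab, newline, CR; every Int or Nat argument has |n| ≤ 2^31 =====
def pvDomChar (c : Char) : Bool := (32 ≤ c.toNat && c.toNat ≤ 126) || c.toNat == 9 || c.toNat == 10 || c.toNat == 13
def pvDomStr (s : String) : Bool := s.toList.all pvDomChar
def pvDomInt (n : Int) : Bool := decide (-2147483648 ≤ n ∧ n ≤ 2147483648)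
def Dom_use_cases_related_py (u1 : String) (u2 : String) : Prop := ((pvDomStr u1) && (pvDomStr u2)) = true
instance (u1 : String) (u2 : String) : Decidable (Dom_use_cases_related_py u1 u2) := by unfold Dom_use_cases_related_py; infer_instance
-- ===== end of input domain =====

-- B replaces A's nested per-group/per-string short-circuit loop by a flat term→bit table,
-- one OR-accumulating mask pass per string, and a bitwise AND test; alternative decomposition.

-- ===== PORT A =====
-- the set literals in iteration order: `any` over a set is order-independent, so this is exact
def pvGroupsA : List (List String) := [
  ["site search", "product search", "search", "ecommerce search"],
  ["recommendations", "personalization", "product recommendations"],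
  ["content discovery", "content search", "media search"],
  ["support", "help desk", "knowledge base", "documentation"]]

-- the `for group in related_groups` loop with its early `return True`
def pvLoopA (u1 : String) (u2 : String) : List (List String) → Bool
  | [] => false
  | g :: rest =>
      if (g.any fun t => PySem.Str.isIn t u1) && (g.any fun t => PySem.Str.isIn t u2) then true
      else pvLoopA u1 u2 rest

def use_cases_related_py (u1 : String) (u2 : String) : Bool := pvLoopA u1 u2 pvGroupsA

-- ===== PORT B =====
-- the flat _TERM_BITS table of Source B
def pvTermBits : List (String × Nat) := [
  ("site search", 1), ("product search", 1), ("search", 1), ("ecommerce search", 1),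
  ("recommendations", 2), ("personalization", 2), ("product recommendations", 2),
  ("content discovery", 4), ("content search", 4), ("media search", 4),
  ("support", 8), ("help desk", 8), ("knowledge base", 8), ("documentation", 8)]

-- _match_mask: m = 0; for term, bit in _TERM_BITS: if term in u: m |= bit
def pvMatchMask (u : String) : Nat :=
  pvTermBits.foldl (fun m p => if PySem.Str.isIn p.1 u then m ||| p.2 else m) 0

def use_cases_related_py_alt (u1 : String) (u2 : String) : Bool :=
  (pvMatchMask u1 &&& pvMatchMask u2) != 0

-- ===== PRECONDITION & SPEC =====
def Spec_use_cases_related_py (u1 : String) (u2 : String) (out : Bool) : Prop := out = use_cases_related_py_alt u1 u2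
instance (u1 : String) (u2 : String) (out : Bool) : Decidable (Spec_use_cases_related_py u1 u2 out) := by unfold Spec_use_cases_related_py; infer_instance

-- ===== CLAIM (what is proved, stated in full; the proofs are below) =====
def Claim_equal_use_cases_related_py : Prop := ∀ (u1 : String) (u2 : String), Dom_use_cases_related_py u1 u2 → Spec_use_cases_related_py u1 u2 (use_cases_related_py u1 u2)

-- ===== LEMMAS AND PROOFS =====

-- the mask fold, abstracted over the 14 term-membership booleans, equals a 4-bit word
-- whose bits are the four group-level `any`s
-- the string fold is the bool fold over the list of membership tests
theorem pv_fold_map (u : String) (l : List (String × Nat)) (m : Nat) :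
    l.foldl (fun m p => if PySem.Str.isIn p.1 u then m ||| p.2 else m) m
    = (l.map (fun p => (PySem.Str.isIn p.1 u, p.2))).foldl
        (fun m p => if p.1 then m ||| p.2 else m) m := by
  induction l generalizing m with
  | nil => rfl
  | cons h t ih => simp only [List.foldl_cons, List.map_cons]; exact ih _

-- the mask fold over the 14 membership booleans, fully abstracted, proved by one kernel evaluation
theorem pv_mask_core : ∀ (t1 t2 t3 t4 t5 t6 t7 t8 t9 t10 t11 t12 t13 t14 : Bool),
    ([(t1,1),(t2,1),(t3,1),(t4,1),(t5,2),(t6,2),(t7,2),(t8,4),(t9,4),(t10,4),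
      (t11,8),(t12,8),(t13,8),(t14,8)].foldl
        (fun m p => if p.1 then m ||| p.2 else m) 0 : Nat)
    = cond (t1||(t2||(t3||t4))) 1 0 ||| cond (t5||(t6||t7)) 2 0 |||
      cond (t8||(t9||t10)) 4 0 ||| cond (t11||(t12||(t13||t14))) 8 0 := by decide

-- the mask fold equals a 4-bit word whose bits are the four group-level `any`s
theorem pv_mask_eq (u : String) :
    pvMatchMask u =
      (cond (["site search", "product search", "search", "ecommerce search"].any fun t => PySem.Str.isIn t u) 1 0) |||
      (cond (["recommendations", "personalization", "product recommendations"].any fun t => PySem.Str.isIn t u) 2 0) |||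
      (cond (["content discovery", "content search", "media search"].any fun t => PySem.Str.isIn t u) 4 0) |||
      (cond (["support", "help desk", "knowledge base", "documentation"].any fun t => PySem.Str.isIn t u) 8 0) := by
  unfold pvMatchMask pvTermBits
  rw [pv_fold_map]
  simp only [List.map, List.any_cons, List.any_nil, Bool.or_false]
  exact pv_mask_core
    (PySem.Str.isIn "site search" u) (PySem.Str.isIn "product search" u)
    (PySem.Str.isIn "search" u) (PySem.Str.isIn "ecommerce search" u)
    (PySem.Str.isIn "recommendations" u) (PySem.Str.isIn "personalization" u)
    (PySem.Str.isIn "product recommendations" u)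
    (PySem.Str.isIn "content discovery" u) (PySem.Str.isIn "content search" u)
    (PySem.Str.isIn "media search" u)
    (PySem.Str.isIn "support" u) (PySem.Str.isIn "help desk" u)
    (PySem.Str.isIn "knowledge base" u) (PySem.Str.isIn "documentation" u)

-- A's if-chain over the 8 group-level booleans equals the bitwise AND test of the two masks
theorem pv_key (a1 a2 a3 a4 b1 b2 b3 b4 : Bool) :
    (if a1 && b1 then true else if a2 && b2 then true else
     if a3 && b3 then true else if a4 && b4 then true else false) =
    (((cond a1 1 0 ||| cond a2 2 0 ||| cond a3 4 0 ||| cond a4 8 0 : Nat) &&&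
      (cond b1 1 0 ||| cond b2 2 0 ||| cond b3 4 0 ||| cond b4 8 0)) != 0) := by
  cases a1 <;> cases a2 <;> cases a3 <;> cases a4 <;>
  cases b1 <;> cases b2 <;> cases b3 <;> cases b4 <;> decide

-- ===== VERDICT (by name: the statement is the Claim_ definition above) =====
theorem use_cases_related_py_spec : Claim_equal_use_cases_related_py := by
  intro u1 u2 _
  unfold Spec_use_cases_related_py use_cases_related_py use_cases_related_py_alt
  rw [pv_mask_eq u1, pv_mask_eq u2]
  have h := pv_key
    (["site search", "product search", "search", "ecommerce search"].any fun t => PySem.Str.isIn t u1)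
    (["recommendations", "personalization", "product recommendations"].any fun t => PySem.Str.isIn t u1)
    (["content discovery", "content search", "media search"].any fun t => PySem.Str.isIn t u1)
    (["support", "help desk", "knowledge base", "documentation"].any fun t => PySem.Str.isIn t u1)
    (["site search", "product search", "search", "ecommerce search"].any fun t => PySem.Str.isIn t u2)
    (["recommendations", "personalization", "product recommendations"].any fun t => PySem.Str.isIn t u2)
    (["content discovery", "content search", "media search"].any fun t => PySem.Str.isIn t u2)
    (["support", "help desk", "knowledge base", "documentation"].any fun t => PySem.Str.isIn t u2)
  simpa [pvLoopA, pvGroupsA] using h
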